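-- pv_equiv track=rewrite | github.com/unamfi/sistop-2024-2 | tareas/1/BolañosJulian-ZuritaJuanPablo/sistop_t1.py | primer_ajuste
-- ===== SOURCE A (Python) =====
-- def primer_ajuste(memory:list, numProcesses:int, process:str) -> list:
--
--     numFreeSpaces = memory.count('-')
--
--     if numFreeSpaces >= numProcesses:
--         for i in range(numProcesses):
--             aux = memory.index('-')
--             memory.insert(aux, process)
--             memory.remove('-')
--     else:
--         for i in range(numFreeSpaces):
--             aux = memory.index('-')
--             memory.insert(aux, process)
--             memory.remove('-')
--
--     return memory
-- ===== SOURCE B (Python) =====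
-- def primer_ajuste(memory: list, numProcesses: int, process: str) -> list:
--     # Single linear scan: overwrite the first min(numProcesses, free) '-' cells in place.
--     remaining = numProcesses
--     for i in range(len(memory)):
--         if remaining <= 0:
--             break
--         if memory[i] == '-':
--             memory[i] = process
--             remaining -= 1
--     return memory
-- ===== Notes on version B (the rewrite author's own statement) =====
-- stated objective: alternative
-- what changed: replaces the repeated count/index/insert/remove passes with a single left-to-right scan that overwrites the first min(numProcesses, free) '-' cells in place
import Mathlib
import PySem

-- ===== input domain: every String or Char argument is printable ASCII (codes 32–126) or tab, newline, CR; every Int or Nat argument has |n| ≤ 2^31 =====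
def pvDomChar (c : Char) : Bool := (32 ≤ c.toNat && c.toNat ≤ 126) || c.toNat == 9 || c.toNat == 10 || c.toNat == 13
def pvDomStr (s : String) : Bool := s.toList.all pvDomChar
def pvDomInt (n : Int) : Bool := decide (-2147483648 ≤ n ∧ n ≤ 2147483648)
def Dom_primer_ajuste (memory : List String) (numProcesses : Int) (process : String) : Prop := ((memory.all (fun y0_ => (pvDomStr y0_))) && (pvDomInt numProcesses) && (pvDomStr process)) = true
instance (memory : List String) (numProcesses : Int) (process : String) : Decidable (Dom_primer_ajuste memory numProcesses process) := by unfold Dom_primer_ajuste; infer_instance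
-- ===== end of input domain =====

-- B replaces A's repeated count/index/insert/remove passes with one linear scan; equivalence is
-- about the return value (both Pythons also mutate `memory` in place, ending in the same state).

-- ===== PORT A =====
-- one iteration of A's loop body: aux = memory.index('-'); memory.insert(aux, process); memory.remove('-')
-- (the `none` fallbacks are unreachable: the loop runs at most `memory.count('-')` times, so a '-' is always present)
def pvStepA (process : String) (m : List String) : List String :=
  match PySem.List.index? m "-" with
  | some aux =>
    match PySem.List.remove? (PySem.List.insert m (aux : Int) process) "-" with
    | some m' => m'
    | none => m
  | none => m

def primer_ajuste (memory : List String) (numProcesses : Int) (process : String) : List String :=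
  let numFreeSpaces := PySem.List.count memory "-"
  if (numFreeSpaces : Int) ≥ numProcesses then
    (PySem.List.pyRange 0 numProcesses 1).foldl (fun m _ => pvStepA process m) memory
  else
    (PySem.List.pyRange 0 (numFreeSpaces : Int) 1).foldl (fun m _ => pvStepA process m) memory

-- ===== PORT B =====
-- B's index loop with early break, as structural recursion over the list with the remaining budget
def pvGoB (process : String) : List String → Int → List String
  | [], _ => []
  | x :: xs, k =>
    if k ≤ 0 then x :: xs
    else if x = "-" then process :: pvGoB process xs (k - 1)
    else x :: pvGoB process xs k

def primer_ajuste_alt (memory : List String) (numProcesses : Int) (process : String) : List String :=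
  pvGoB process memory numProcesses

-- ===== PRECONDITION & SPEC =====
def Spec_primer_ajuste (memory : List String) (numProcesses : Int) (process : String) (out : List String) : Prop := out = primer_ajuste_alt memory numProcesses process
instance (memory : List String) (numProcesses : Int) (process : String) (out : List String) : Decidable (Spec_primer_ajuste memory numProcesses process out) := by unfold Spec_primer_ajuste; infer_instance

-- ===== CLAIM (what is proved, stated in full; the proofs are below) =====
def Claim_equal_primer_ajuste : Prop := ∀ (memory : List String) (numProcesses : Int) (process : String), Dom_primer_ajuste memory numProcesses process → Spec_primer_ajuste memory numProcesses process (primer_ajuste memory numProcesses process)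

-- ===== LEMMAS AND PROOFS =====

-- replace the first '-' of m by p
def pvRF (p : String) : List String → List String
  | [] => []
  | x :: xs => if x = "-" then p :: xs else x :: pvRF p xs

-- replace the first n occurrences of '-' in m by p (reference function both ports reduce to)
def pvRepN (p : String) : Nat → List String → List String
  | _, [] => []
  | 0, m => m
  | n+1, x :: xs => if x = "-" then p :: pvRepN p n xs else x :: pvRepN p (n+1) xs

lemma pvRepN_zero (p : String) (m : List String) : pvRepN p 0 m = m := by
  cases m <;> rfl

lemma pvGoB_eq_repN (p : String) : ∀ (m : List String) (k : Int), pvGoB p m k = pvRepN p k.toNat m := by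
  intro m
  induction m with
  | nil => intro k; simp [pvGoB, pvRepN]
  | cons x xs ih =>
    intro k
    by_cases hk : k ≤ 0
    · have h0 : k.toNat = 0 := by omega
      simp [pvGoB, hk, h0, pvRepN_zero]
    · have h1 : k.toNat = (k - 1).toNat + 1 := by omega
      rw [h1]
      by_cases hx : x = "-"
      · simp [pvGoB, hk, hx, pvRepN, ih]
      · simp only [pvGoB, if_neg hk, if_neg hx, pvRepN]
        rw [ih k, h1]

lemma pvFoldl_const {α : Type} (f : α → α) : ∀ (l : List Int) (m : α),
    l.foldl (fun m _ => f m) m = f^[l.length] m := by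
  intro l
  induction l with
  | nil => intro m; rfl
  | cons a l ih => intro m; simp [List.foldl, ih, Function.iterate_succ_apply]

lemma pvStepA_eq_rf (p : String) : ∀ m : List String, "-" ∈ m → pvStepA p m = pvRF p m := by
  intro m hm
  induction m with
  | nil => cases hm
  | cons x xs ih =>
    by_cases hx : x = "-"
    · subst hx
      have hidx : PySem.List.index? ("-" :: xs) "-" = some 0 :=
        PySem.List.index?_cons_self _ _
      unfold pvStepA
      rw [hidx]
      simp only [Nat.cast_zero, PySem.List.insert_zero]
      by_cases hp : p = "-"
      · subst hp
        rw [PySem.List.remove?_cons_self]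
        simp [pvRF]
      · rw [PySem.List.remove?_cons_of_ne _ hp, PySem.List.remove?_cons_self]
        simp [pvRF]
    · have hxs : "-" ∈ xs := by
        rcases List.mem_cons.mp hm with h | h
        · exact absurd h.symm hx
        · exact h
      obtain ⟨j, hj⟩ : ∃ j, PySem.List.index? xs "-" = some j :=
        Option.isSome_iff_exists.mp ((PySem.List.index?_isSome_iff xs "-").mpr hxs)
      obtain ⟨hjlt, hxj, _⟩ := PySem.List.getElem_of_index?_eq_some hj
      have hidx : PySem.List.index? (x :: xs) "-" = some (j + 1) := by
        rw [PySem.List.index?_cons_of_ne _ hx, hj]; rfl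
      have hins : PySem.List.insert (x :: xs) ((j + 1 : Nat) : Int) p
          = x :: PySem.List.insert xs ((j : Nat) : Int) p := by
        rw [PySem.List.insert_natCast _ _ _ (by simp; omega),
            PySem.List.insert_natCast _ _ _ (Nat.le_of_lt hjlt)]
        simp
      have hmemins : "-" ∈ PySem.List.insert xs ((j : Nat) : Int) p := by
        rw [PySem.List.insert_natCast _ _ _ (Nat.le_of_lt hjlt)]
        refine List.mem_append.mpr (Or.inr (List.mem_cons.mpr (Or.inr ?_)))
        have h3 : (xs.drop j)[0]'(by simp; omega) = "-" := by
          rw [List.getElem_drop]; simpa using hxj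
        rw [← h3]
        exact List.getElem_mem _
      obtain ⟨t, ht⟩ : ∃ t, PySem.List.remove? (PySem.List.insert xs ((j : Nat) : Int) p) "-" = some t :=
        ⟨_, PySem.List.remove?_eq_some_erase _ _ hmemins⟩
      have hihval : pvStepA p xs = t := by
        unfold pvStepA
        rw [hj]
        simp [ht]
      unfold pvStepA
      rw [hidx]
      simp only [hins, PySem.List.remove?_cons_of_ne _ hx, ht, Option.map_some]
      rw [pvRF, if_neg hx, ← ih hxs, hihval]

lemma pvRepN_nodash (p : String) : ∀ (m : List String), List.count "-" m = 0 → ∀ n, pvRepN p n m = m := by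
  intro m
  induction m with
  | nil => intro _ n; cases n <;> rfl
  | cons x xs ih =>
    intro hc n
    have hx : x ≠ "-" := by
      intro h; subst h; simp at hc
    have hxs : List.count "-" xs = 0 := by
      rw [List.count_cons] at hc
      omega
    cases n with
    | zero => rfl
    | succ n => simp [pvRepN, hx, ih hxs]

lemma pvRepN_dash_id : ∀ (m : List String) (n : Nat), pvRepN "-" n m = m := by
  intro m
  induction m with
  | nil => intro n; cases n <;> rfl
  | cons x xs ih =>
    intro n
    cases n with
    | zero => rfl
    | succ n => by_cases hx : x = "-" <;> simp [pvRepN, hx, ih]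

lemma pvRepN_commute (p : String) : ∀ (m : List String), "-" ∈ m →
    ∀ t : Nat, pvRepN p (t + 1) m = pvRepN p t (pvRF p m) := by
  intro m hm
  induction m with
  | nil => cases hm
  | cons x xs ih =>
    intro t
    by_cases hx : x = "-"
    · subst hx
      cases t with
      | zero => simp [pvRepN, pvRF, pvRepN_zero]
      | succ t =>
        by_cases hp : p = "-"
        · subst hp; simp [pvRepN, pvRF, pvRepN_dash_id]
        · simp [pvRepN, pvRF, hp]
    · have hxs : "-" ∈ xs := by
        rcases List.mem_cons.mp hm with h | h
        · exact absurd h.symm hx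
        · exact h
      cases t with
      | zero =>
        simp only [pvRepN, pvRF, if_neg hx, pvRepN_zero]
        rw [ih hxs 0, pvRepN_zero]
      | succ t =>
        simp only [pvRepN, pvRF, if_neg hx]
        rw [ih hxs (t + 1)]

lemma pvRF_count (p : String) : ∀ m : List String, "-" ∈ m →
    List.count "-" m ≤ List.count "-" (pvRF p m) + 1 := by
  intro m hm
  induction m with
  | nil => cases hm
  | cons x xs ih =>
    by_cases hx : x = "-"
    · subst hx
      simp only [pvRF, List.count_cons]
      by_cases hp : p = "-" <;> simp [hp]
    · have hxs : "-" ∈ xs := by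
        rcases List.mem_cons.mp hm with h | h
        · exact absurd h.symm hx
        · exact h
      have := ih hxs
      simp only [pvRF, if_neg hx, List.count_cons]
      split <;> omega

lemma pvIterA_eq_repN (p : String) : ∀ (t : Nat) (m : List String), t ≤ List.count "-" m →
    (pvStepA p)^[t] m = pvRepN p t m := by
  intro t
  induction t with
  | zero => intro m _; rw [Function.iterate_zero_apply, pvRepN_zero]
  | succ t ih =>
    intro m ht
    have hmem : "-" ∈ m := List.count_pos_iff.mp (by omega)
    rw [Function.iterate_succ_apply, pvStepA_eq_rf p m hmem,
        ih (pvRF p m) (by have := pvRF_count p m hmem; omega),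
        ← pvRepN_commute p m hmem]

lemma pvRepN_stable (p : String) : ∀ (m : List String) (a b : Nat),
    List.count "-" m ≤ a → List.count "-" m ≤ b → pvRepN p a m = pvRepN p b m := by
  intro m
  induction m with
  | nil => intro a b _ _; cases a <;> cases b <;> rfl
  | cons x xs ih =>
    intro a b ha hb
    rw [List.count_cons] at ha hb
    by_cases hx : x = "-"
    · subst hx
      simp only [BEq.rfl, if_pos] at ha hb
      cases a with
      | zero => omega
      | succ a =>
        cases b with
        | zero => omega
        | succ b => simp [pvRepN, ih a b (by omega) (by omega)]
    · have hbx : (x == "-") = false := by simp [hx]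
      simp only [hbx] at ha hb
      have hcnt : List.count "-" (x :: xs) = List.count "-" xs := by
        simp [List.count_cons, hbx]
      cases a with
      | zero =>
        rw [pvRepN_zero]
        exact (pvRepN_nodash p (x :: xs) (by rw [hcnt]; omega) b).symm
      | succ a =>
        cases b with
        | zero =>
          rw [pvRepN_zero]
          exact pvRepN_nodash p (x :: xs) (by rw [hcnt]; omega) (a + 1)
        | succ b => simp [pvRepN, hx, ih (a+1) (b+1) (by omega) (by omega)]

-- ===== VERDICT (by name: the statement is the Claim_ definition above) =====
theorem primer_ajuste_spec : Claim_equal_primer_ajuste := by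
  intro memory numProcesses process _
  unfold Spec_primer_ajuste primer_ajuste primer_ajuste_alt
  have hc : PySem.List.count memory "-" = List.count "-" memory := PySem.List.count_eq ..
  rw [pvGoB_eq_repN]
  by_cases hge : ((PySem.List.count memory "-" : Nat) : Int) ≥ numProcesses
  · rw [if_pos hge, pvFoldl_const, PySem.List.length_pyRange_one,
        pvIterA_eq_repN process _ memory (by rw [← hc]; omega)]
    congr 1
    omega
  · rw [if_neg hge, pvFoldl_const, PySem.List.length_pyRange_one,
        pvIterA_eq_repN process _ memory (by rw [← hc]; omega)]
    apply pvRepN_stable <;> rw [← hc] <;> omega
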